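-- pv_equiv track=rewrite | github.com/dakara32/GPT_Code | factor.py | _disjoint_keepG
-- ===== SOURCE A (Python) =====
-- def _disjoint_keepG(top_G, top_D, poolD):
--     """G重複をDから除去し、poolDで順次補充（枯渇時は元銘柄維持）。"""
--     used, D, i = set(top_G), list(top_D), 0
--     for j, t in enumerate(D):
--         if t not in used:
--             continue
--         while i < len(poolD) and (poolD[i] in used or poolD[i] in D):
--             i += 1
--         if i < len(poolD):
--             D[j] = poolD[i]; used.add(D[j]); i += 1
--     return top_G, D
-- ===== SOURCE B (Python) =====
-- def _disjoint_keepG(top_G, top_D, poolD):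
--     """Two separate passes: precompute the queue of fresh replacements, then sweep top_D."""
--     forbidden = set(top_G) | set(top_D)
--     fresh = []
--     for p in poolD:
--         if p not in forbidden:
--             fresh.append(p)
--             forbidden.add(p)
--     gset = set(top_G)
--     D = []
--     k = 0
--     for t in top_D:
--         if t in gset and k < len(fresh):
--             D.append(fresh[k])
--             k += 1
--         else:
--             D.append(t)
--     return top_G, D
-- ===== Notes on version B (the rewrite author's own statement) =====
-- stated objective: alternative
-- what changed: Replaces A's interleaved sweep (shared monotone pool pointer with a 'poolD[i] in D' list scan inside the D loop) by two independent passes: one pass over poolD precomputes the queue of fresh replacements against a growing forbidden set, then a separate pass over top_D consumes that queue for slots that collide with top_G.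
import Mathlib
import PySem

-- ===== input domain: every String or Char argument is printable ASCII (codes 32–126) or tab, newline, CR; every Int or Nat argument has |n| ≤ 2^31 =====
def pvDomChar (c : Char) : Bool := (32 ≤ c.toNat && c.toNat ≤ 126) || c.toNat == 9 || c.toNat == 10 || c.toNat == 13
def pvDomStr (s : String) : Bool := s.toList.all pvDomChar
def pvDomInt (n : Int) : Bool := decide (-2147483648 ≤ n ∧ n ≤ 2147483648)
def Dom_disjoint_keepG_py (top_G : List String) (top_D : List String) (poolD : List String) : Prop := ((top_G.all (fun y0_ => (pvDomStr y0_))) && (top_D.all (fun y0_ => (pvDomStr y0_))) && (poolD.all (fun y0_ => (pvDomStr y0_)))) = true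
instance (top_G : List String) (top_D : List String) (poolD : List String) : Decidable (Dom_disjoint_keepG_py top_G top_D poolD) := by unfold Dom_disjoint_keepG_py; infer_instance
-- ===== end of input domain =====

-- B precomputes the fresh-replacement queue in one pass over poolD, then sweeps top_D separately;
-- A interleaves pool scanning with the D sweep via a shared pointer. Return values proved equal.

-- ===== PORT A =====
-- the inner 'while i < len(poolD) and (poolD[i] in used or poolD[i] in D): i += 1'
-- (structural recursion on the exact remaining trip count poolD.length - i, passed by each caller)
def skipA (poolD : List String) (used : PySem.Set String) (D : List String) : Nat → Nat → Nat
  | 0, i => i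
  | fuel + 1, i =>
    if h : i < poolD.length then
      if PySem.Set.contains used poolD[i] || D.contains poolD[i] then
        skipA poolD used D fuel (i + 1)
      else i
    else i

-- the 'for j, t in enumerate(D)' loop; state: used, the mutable list D, pool pointer i, index j
-- (structural recursion on the exact remaining trip count D.length - j)
def loopA (poolD : List String) : Nat → PySem.Set String → List String → Nat → Nat → List String
  | 0, _, D, _, _ => D
  | fuel + 1, used, D, i, j =>
    if h : j < D.length then
      let t := D[j]
      if PySem.Set.contains used t then
        let i' := skipA poolD used D (poolD.length - i) i
        if h2 : i' < poolD.length then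
          loopA poolD fuel (PySem.Set.add used poolD[i']) (D.set j poolD[i']) (i' + 1) (j + 1)
        else
          loopA poolD fuel used D i' (j + 1)
      else
        loopA poolD fuel used D i (j + 1)
    else D

def disjoint_keepG_py (top_G : List String) (top_D : List String) (poolD : List String) : List String × List String :=
  (top_G, loopA poolD top_D.length (PySem.Set.ofList top_G) top_D 0 0)

-- ===== PORT B =====
-- first pass: collect fresh replacements from poolD against the growing 'forbidden' set
def altFresh (poolD : List String) (forbidden : PySem.Set String) : List String :=
  match poolD with
  | [] => []
  | p :: rest =>
    if PySem.Set.contains forbidden p then altFresh rest forbidden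
    else p :: altFresh rest (PySem.Set.add forbidden p)

-- second pass: sweep top_D, consuming the fresh queue on slots colliding with top_G
def altAssign (topD : List String) (fresh : List String) (gset : PySem.Set String) : List String :=
  match topD with
  | [] => []
  | t :: rest =>
    if PySem.Set.contains gset t then
      match fresh with
      | [] => t :: altAssign rest [] gset
      | f :: fs => f :: altAssign rest fs gset
    else t :: altAssign rest fresh gset

def disjoint_keepG_py_alt (top_G : List String) (top_D : List String) (poolD : List String) : List String × List String :=
  (top_G, altAssign top_D
            (altFresh poolD (PySem.Set.union (PySem.Set.ofList top_G) top_D))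
            (PySem.Set.ofList top_G))

-- ===== PRECONDITION & SPEC =====
def Spec_disjoint_keepG_py (top_G : List String) (top_D : List String) (poolD : List String) (out : List String × List String) : Prop := out = disjoint_keepG_py_alt top_G top_D poolD
instance (top_G : List String) (top_D : List String) (poolD : List String) (out : List String × List String) : Decidable (Spec_disjoint_keepG_py top_G top_D poolD out) := by unfold Spec_disjoint_keepG_py; infer_instance

-- ===== CLAIM (what is proved, stated in full; the proofs are below) =====
def Claim_equal_disjoint_keepG_py : Prop := ∀ (top_G : List String) (top_D : List String) (poolD : List String), Dom_disjoint_keepG_py top_G top_D poolD → Spec_disjoint_keepG_py top_G top_D poolD (disjoint_keepG_py top_G top_D poolD)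

-- ===== LEMMAS AND PROOFS =====

lemma pvCTrue {s : PySem.Set String} {x : String} (h : x ∈ s) : PySem.Set.contains s x = true :=
  (PySem.Set.contains_iff s x).2 h

lemma pvCNot {s : PySem.Set String} {x : String} (h : x ∉ s) : ¬ (PySem.Set.contains s x = true) :=
  fun hc => h ((PySem.Set.contains_iff s x).1 hc)

lemma altFresh_nil (forb : PySem.Set String) : altFresh [] forb = [] := rfl

lemma altFresh_cons_mem {forb : PySem.Set String} {p : String} (rest : List String) (h : p ∈ forb) :
    altFresh (p :: rest) forb = altFresh rest forb := by
  rw [altFresh, if_pos (pvCTrue h)]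

lemma altFresh_cons_not_mem {forb : PySem.Set String} {p : String} (rest : List String) (h : p ∉ forb) :
    altFresh (p :: rest) forb = p :: altFresh rest (PySem.Set.add forb p) := by
  rw [altFresh, if_neg (pvCNot h)]

lemma altAssign_nil (fresh : List String) (gset : PySem.Set String) : altAssign [] fresh gset = [] := rfl

lemma altAssign_cons_miss {gset : PySem.Set String} {t : String} (rest fresh : List String) (h : t ∉ gset) :
    altAssign (t :: rest) fresh gset = t :: altAssign rest fresh gset := by
  cases fresh with
  | nil => rw [altAssign, if_neg (pvCNot h)]
  | cons f fs => rw [altAssign, if_neg (pvCNot h)]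

lemma altAssign_cons_hit {gset : PySem.Set String} {t : String} (rest fs : List String) (f : String) (h : t ∈ gset) :
    altAssign (t :: rest) (f :: fs) gset = f :: altAssign rest fs gset := by
  rw [altAssign, if_pos (pvCTrue h)]

lemma altAssign_cons_dry {gset : PySem.Set String} {t : String} (rest : List String) (h : t ∈ gset) :
    altAssign (t :: rest) [] gset = t :: altAssign rest [] gset := by
  rw [altAssign, if_pos (pvCTrue h)]

-- the skip loop stops at a pool element that is neither in used nor in D
lemma skipA_stop (poolD : List String) (used : PySem.Set String) (D : List String) :
    ∀ fuel i k, fuel = poolD.length - i → skipA poolD used D fuel i = k →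
      ∀ _hk : k < poolD.length,
      (PySem.Set.contains used poolD[k] || D.contains poolD[k]) = false := by
  intro fuel
  induction fuel with
  | zero =>
    intro i k hfe heq hk
    rw [skipA] at heq
    subst heq
    omega
  | succ fuel ihf =>
    intro i k hfe heq hk
    have hi : i < poolD.length := by omega
    rw [skipA, dif_pos hi] at heq
    by_cases hc : (PySem.Set.contains used poolD[i] || D.contains poolD[i]) = true
    · rw [if_pos hc] at heq
      exact ihf (i + 1) k (by omega) heq hk
    · rw [if_neg hc] at heq
      subst heq
      exact Bool.eq_false_iff.2 hc

-- A's pool scan from pointer i, under the membership invariant, produces exactly B's fresh queue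
lemma skip_fresh (poolD : List String) (used : PySem.Set String) (D : List String)
    (forb : PySem.Set String)
    (Hf : ∀ x, (x ∈ used ∨ x ∈ D) ↔ x ∈ forb) :
    ∀ fuel i, fuel = poolD.length - i →
      altFresh (poolD.drop i) forb =
      (if h : skipA poolD used D fuel i < poolD.length then
        poolD[skipA poolD used D fuel i] ::
          altFresh (poolD.drop (skipA poolD used D fuel i + 1))
            (PySem.Set.add forb poolD[skipA poolD used D fuel i])
      else []) := by
  intro fuel
  induction fuel with
  | zero =>
    intro i hfe
    rw [skipA, dif_neg (by omega), List.drop_eq_nil_of_le (by omega), altFresh_nil]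
  | succ fuel ihf =>
    intro i hfe
    have hi : i < poolD.length := by omega
    rw [skipA, dif_pos hi]
    by_cases hc : (PySem.Set.contains used poolD[i] || D.contains poolD[i]) = true
    · rw [if_pos hc]
      have hm : poolD[i] ∈ forb := by
        rw [← Hf]
        rcases Bool.or_eq_true_iff.1 hc with hc' | hc'
        · exact Or.inl ((PySem.Set.contains_iff used poolD[i]).1 hc')
        · exact Or.inr (by simpa using hc')
      rw [← List.getElem_cons_drop hi, altFresh_cons_mem _ hm, ihf (i + 1) (by omega)]
    · rw [if_neg hc]
      have hm : poolD[i] ∉ forb := by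
        rw [← Hf]
        rintro (hx | hx)
        · exact hc (Bool.or_eq_true_iff.2 (Or.inl (pvCTrue hx)))
        · exact hc (Bool.or_eq_true_iff.2 (Or.inr (by simpa using hx)))
      rw [dif_pos hi, ← List.getElem_cons_drop hi, altFresh_cons_not_mem _ hm]

lemma take_cons_getElem (D : List String) (j : Nat) (h : j < D.length) :
    D.take (j + 1) = D.take j ++ [D[j]] := by
  apply List.ext_getElem
  · simp <;> omega
  · intro k hk1 hk2
    by_cases hkj : k = j
    · subst hkj
      rw [List.getElem_take, List.getElem_append_right (by simp <;> omega)]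
      simp
    · have hklt : k < j := by simp at hk1; omega
      rw [List.getElem_take, List.getElem_append_left (by simp <;> omega)]
      simp [List.getElem_take]

lemma take_set_succ (D : List String) (j : Nat) (h : j < D.length) (r : String) :
    (D.set j r).take (j + 1) = D.take j ++ [r] := by
  apply List.ext_getElem
  · simp <;> omega
  · intro k hk1 hk2
    simp only [List.getElem_take, List.getElem_set]
    by_cases hkj : k = j
    · subst hkj
      rw [if_pos rfl, List.getElem_append_right (by simp)]
      simp
    · have hklt : k < j := by
        have : k < j + 1 := by simp at hk1; omega
        omega
      rw [if_neg (by omega), List.getElem_append_left (by simp <;> omega)]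
      simp [List.getElem_take]

-- main invariant: A's loop from index j equals the processed prefix plus B's sweep of the rest
lemma loop_eq (poolD : List String) (gset : PySem.Set String) :
    ∀ fuel (used : PySem.Set String) (D : List String) (forb : PySem.Set String) (i j : Nat),
      fuel + j = D.length →
      (∀ x, (x ∈ used ∨ x ∈ D) ↔ x ∈ forb) →
      (∀ x ∈ D.drop j, (x ∈ used ↔ x ∈ gset)) →
      loopA poolD fuel used D i j =
        D.take j ++ altAssign (D.drop j) (altFresh (poolD.drop i) forb) gset := by
  intro fuel
  induction fuel with
  | zero =>
    intro used D forb i j hn _ _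
    have hj : j = D.length := by omega
    subst hj
    rw [loopA]
    simp [altAssign_nil]
  | succ fuel ih =>
    intro used D forb i j hn Hf Hg
    have hj : j < D.length := by omega
    rw [loopA, dif_pos hj]
    have hdropj : D[j] :: D.drop (j + 1) = D.drop j := List.getElem_cons_drop hj
    have htj : D[j] ∈ D.drop j := by rw [← hdropj]; exact List.mem_cons_self ..
    have hfresh := skip_fresh poolD used D forb Hf (poolD.length - i) i rfl
    by_cases hu : D[j] ∈ used
    · rw [if_pos (pvCTrue hu)]
      have hg : D[j] ∈ gset := (Hg _ htj).1 hu
      by_cases h2 : skipA poolD used D (poolD.length - i) i < poolD.length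
      · rw [dif_pos h2]
        set i' := skipA poolD used D (poolD.length - i) i with hi'
        set r := poolD[i'] with hr
        have hstop := skipA_stop poolD used D (poolD.length - i) i i' rfl rfl h2
        have hrused : r ∉ used := by
          intro hc
          rw [pvCTrue hc] at hstop
          simp at hstop
        have hrD : r ∉ D := by
          intro hc
          have hb : D.contains r = true := by simpa using hc
          rw [hb, Bool.or_true] at hstop
          simp at hstop
        have hrforb : r ∉ forb := fun hc => (not_or.2 ⟨hrused, hrD⟩) ((Hf r).2 hc)
        rw [dif_pos h2] at hfresh
        rw [← hdropj, hfresh, altAssign_cons_hit _ _ _ hg]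
        have hset : D.set j r = D.take j ++ r :: D.drop (j + 1) := by
          rw [List.set_eq_take_append_cons_drop]
          simp [hj]
        have hdrop' : (D.set j r).drop (j + 1) = D.drop (j + 1) := by
          apply List.ext_getElem
          · simp
          · intro k hk1 hk2
            simp only [List.getElem_drop, List.getElem_set]
            rw [if_neg (by omega)]
        have HfNew : ∀ x, (x ∈ PySem.Set.add used r ∨ x ∈ D.set j r) ↔ x ∈ PySem.Set.add forb r := by
          intro x
          constructor
          · rintro (hx | hx)
            · rcases (PySem.Set.mem_add _ _ _).1 hx with hx | hx
              · exact (PySem.Set.mem_add _ _ _).2 (Or.inl ((Hf x).1 (Or.inl hx)))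
              · exact (PySem.Set.mem_add _ _ _).2 (Or.inr hx)
            · rw [hset] at hx
              rcases List.mem_append.1 hx with hx | hx
              · exact (PySem.Set.mem_add _ _ _).2 (Or.inl ((Hf x).1 (Or.inr (List.mem_of_mem_take hx))))
              · rcases List.mem_cons.1 hx with hx | hx
                · exact (PySem.Set.mem_add _ _ _).2 (Or.inr hx)
                · exact (PySem.Set.mem_add _ _ _).2 (Or.inl ((Hf x).1 (Or.inr (List.mem_of_mem_drop hx))))
          · intro hx
            rcases (PySem.Set.mem_add _ _ _).1 hx with hx | hx
            · rcases (Hf x).2 hx with hx | hx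
              · exact Or.inl ((PySem.Set.mem_add _ _ _).2 (Or.inl hx))
              · rcases List.mem_iff_getElem.1 hx with ⟨k, hk, hkx⟩
                by_cases hkj : k = j
                · subst hkj
                  subst hkx
                  exact Or.inl ((PySem.Set.mem_add _ _ _).2 (Or.inl hu))
                · refine Or.inr ?_
                  rw [← hkx]
                  exact List.mem_iff_getElem.2 ⟨k, by simpa using hk,
                    by rw [List.getElem_set, if_neg (by omega)]⟩
            · subst hx
              refine Or.inr ?_
              rw [hset]
              exact List.mem_append.2 (Or.inr (List.mem_cons_self ..))
        have HgNew : ∀ x ∈ (D.set j r).drop (j + 1), (x ∈ PySem.Set.add used r ↔ x ∈ gset) := by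
          intro x hx
          rw [hdrop'] at hx
          have hxD : x ∈ D.drop j := by rw [← hdropj]; exact List.mem_cons_of_mem _ hx
          have hxr : x ≠ r := fun hc => hrD (hc ▸ List.mem_of_mem_drop hxD)
          rw [PySem.Set.mem_add]
          simp only [hxr, or_false]
          exact Hg x hxD
        rw [ih (PySem.Set.add used r) (D.set j r) (PySem.Set.add forb r) (i' + 1) (j + 1)
              (by simp <;> omega) HfNew HgNew]
        rw [hdrop', take_set_succ D j hj r]
        simp [hr]
      · rw [dif_neg h2]
        rw [dif_neg h2] at hfresh
        have hi'len : poolD.length ≤ skipA poolD used D (poolD.length - i) i := by omega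
        rw [ih used D forb (skipA poolD used D (poolD.length - i) i) (j + 1) (by omega) Hf
              (fun x hx => Hg x (by rw [← hdropj]; exact List.mem_cons_of_mem _ hx))]
        rw [List.drop_eq_nil_of_le hi'len, altFresh_nil]
        conv_rhs => rw [← hdropj]
        rw [hfresh, altAssign_cons_dry _ hg]
        rw [take_cons_getElem D j hj, List.append_assoc]
        rfl
    · rw [if_neg (pvCNot hu)]
      have hg : D[j] ∉ gset := fun hc => hu ((Hg _ htj).2 hc)
      rw [ih used D forb i (j + 1) (by omega) Hf
            (fun x hx => Hg x (by rw [← hdropj]; exact List.mem_cons_of_mem _ hx))]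
      conv_rhs => rw [← hdropj]
      rw [altAssign_cons_miss _ _ hg]
      rw [take_cons_getElem D j hj, List.append_assoc]
      rfl

-- ===== VERDICT (by name: the statement is the Claim_ definition above) =====
theorem disjoint_keepG_py_spec : Claim_equal_disjoint_keepG_py := by
  intro top_G top_D poolD _
  unfold Spec_disjoint_keepG_py disjoint_keepG_py disjoint_keepG_py_alt
  refine congrArg _ ?_
  have := loop_eq poolD (PySem.Set.ofList top_G) top_D.length (PySem.Set.ofList top_G) top_D
      (PySem.Set.union (PySem.Set.ofList top_G) top_D) 0 0 (by omega)
      (by intro x; rw [PySem.Set.mem_union])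
      (by intro x _; exact Iff.rfl)
  simpa using this
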